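-- pv_equiv track=rewrite | github.com/alenisaw/smartcampus_v2t | src/video/prompts.py | _dedupe_repeated_words
-- ===== SOURCE A (Python) =====
-- from typing import Any, Dict, List, Optional
--
-- def _dedupe_repeated_words(text: str, max_repeat: int = 2) -> str:
--     """Trim pathological repeated-word fragments."""
--
--     words = (text or "").split()
--     out: List[str] = []
--     run_word: Optional[str] = None
--     run_len = 0
--     for word in words:
--         key = word.lower()
--         if key == run_word:
--             run_len += 1
--             if run_len >= max_repeat:
--                 continue
--         else:
--             run_word = key
--             run_len = 0
--         out.append(word)
--     merged = " ".join(out).strip()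
--     if merged and merged[-1] not in ".!?":
--         merged += "."
--     return merged
-- ===== SOURCE B (Python) =====
-- def _dedupe_repeated_words(text: str, max_repeat: int = 2) -> str:
--     """Trim pathological repeated-word fragments (per-word window check)."""
--     words = (text or "").split()
--     cap = max(1, max_repeat)
--     out = [w for i, w in enumerate(words)
--            if i < cap or any(words[j].lower() != w.lower() for j in range(i - cap, i))]
--     merged = " ".join(out).strip()
--     if merged and merged[-1] not in ".!?":
--         merged += "."
--     return merged
-- ===== Notes on version B (the rewrite author's own statement) =====
-- stated objective: alternative
-- what changed: Replaces A's running run_word/run_len state machine with a stateless per-word filter: word i is kept iff i < cap or some of the cap immediately preceding words differs case-insensitively (cap = max(1, max_repeat)), so no run state is carried across words.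
import Mathlib
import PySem

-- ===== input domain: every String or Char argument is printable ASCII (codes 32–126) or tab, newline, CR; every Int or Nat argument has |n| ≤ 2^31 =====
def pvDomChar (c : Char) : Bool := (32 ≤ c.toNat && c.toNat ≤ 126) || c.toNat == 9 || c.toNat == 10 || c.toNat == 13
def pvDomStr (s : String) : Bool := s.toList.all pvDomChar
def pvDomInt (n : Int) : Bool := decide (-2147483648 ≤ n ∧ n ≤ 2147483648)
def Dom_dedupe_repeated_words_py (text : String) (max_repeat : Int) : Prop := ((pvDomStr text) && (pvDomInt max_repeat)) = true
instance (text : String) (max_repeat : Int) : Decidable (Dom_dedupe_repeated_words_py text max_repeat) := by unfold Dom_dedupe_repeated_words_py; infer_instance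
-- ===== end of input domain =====

-- B drops A's running run_word/run_len state machine: each word is kept or dropped by a
-- self-contained window check on the cap preceding words; same output, alternative algorithm.

-- ===== PORT A =====
-- the for-loop of A: state (out, run_word, run_len)
def pvALoop (max_repeat : Int) : List String → List String → Option String → Int → List String
  | [], out, _, _ => out
  | w :: ws, out, runWord, runLen =>
    let key := PySem.Str.lower w
    if some key == runWord then
      let runLen' := runLen + 1
      if runLen' ≥ max_repeat then pvALoop max_repeat ws out runWord runLen'
      else pvALoop max_repeat ws (out ++ [w]) runWord runLen'
    else
      pvALoop max_repeat ws (out ++ [w]) (some key) 0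

def dedupe_repeated_words_py (text : String) (max_repeat : Int) : String :=
  let words := PySem.Str.split₀ text
  let out := pvALoop max_repeat words [] none 0
  let merged := PySem.Str.strip (PySem.Str.join " " out)
  -- 'if merged and merged[-1] not in ".!?"': pyGet? is none exactly when merged is empty
  match PySem.Str.pyGet? merged (-1) with
  | some c => if PySem.Str.isIn (String.ofList [c]) ".!?" then merged else merged ++ "."
  | none => merged

-- ===== PORT B =====
-- 'i < cap or any(words[j].lower() != w.lower() for j in range(i - cap, i))'
-- (the pyGetD default is never the value of the expression Python evaluates: when the 'any'
--  side is reached, cap ≤ i, so every j of the range satisfies 0 ≤ j < len(words))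
def pvBKeep (words : List String) (cap : Int) (i : Int) (w : String) : Bool :=
  decide (i < cap) ||
    (PySem.List.pyRange (i - cap) i 1).any
      (fun j => !(PySem.Str.lower (PySem.List.pyGetD words j "") == PySem.Str.lower w))

-- the list comprehension over enumerate(words)
def pvBOut (words : List String) (cap : Int) : List String :=
  ((PySem.List.enumerate words 0).filter (fun p => pvBKeep words cap p.1 p.2)).map (·.2)

def dedupe_repeated_words_py_alt (text : String) (max_repeat : Int) : String :=
  let words := PySem.Str.split₀ text
  let cap := max 1 max_repeat
  let out := pvBOut words cap
  let merged := PySem.Str.strip (PySem.Str.join " " out)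
  match PySem.Str.pyGet? merged (-1) with
  | some c => if PySem.Str.isIn (String.ofList [c]) ".!?" then merged else merged ++ "."
  | none => merged

-- ===== PRECONDITION & SPEC =====
def Spec_dedupe_repeated_words_py (text : String) (max_repeat : Int) (out : String) : Prop := out = dedupe_repeated_words_py_alt text max_repeat
instance (text : String) (max_repeat : Int) (out : String) : Decidable (Spec_dedupe_repeated_words_py text max_repeat out) := by unfold Spec_dedupe_repeated_words_py; infer_instance

-- ===== CLAIM (what is proved, stated in full; the proofs are below) =====
def Claim_equal_dedupe_repeated_words_py : Prop := ∀ (text : String) (max_repeat : Int), Dom_dedupe_repeated_words_py text max_repeat → Spec_dedupe_repeated_words_py text max_repeat (dedupe_repeated_words_py text max_repeat)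

-- ===== LEMMAS AND PROOFS =====

-- canonical form both word lists are reduced to: consecutive case-insensitive runs, each cut to cap
def pvGroups (cap : Nat) (ws : List String) : List String :=
  match ws with
  | [] => []
  | w :: ws =>
    let key := PySem.Str.lower w
    (w :: ws.takeWhile (fun x => PySem.Str.lower x == key)).take cap
      ++ pvGroups cap (ws.dropWhile (fun x => PySem.Str.lower x == key))
  termination_by ws.length
  decreasing_by
    simpa using Nat.lt_succ_of_le (ws.length_dropWhile_le _)

lemma pvGroups_nil (cap : Nat) : pvGroups cap [] = [] := by
  simp [pvGroups.eq_def]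

lemma pvGroups_cons (cap : Nat) (w : String) (ws : List String) :
    pvGroups cap (w :: ws) =
      (w :: ws.takeWhile (fun x => PySem.Str.lower x == PySem.Str.lower w)).take cap
        ++ pvGroups cap (ws.dropWhile (fun x => PySem.Str.lower x == PySem.Str.lower w)) := by
  rw [pvGroups.eq_def]

lemma pvTakeWhile_false (ws : List String) : ws.takeWhile (fun _ => false) = [] := by
  cases ws <;> simp

lemma pvDropWhile_false (ws : List String) : ws.dropWhile (fun _ => false) = ws := by
  cases ws <;> simp

-- A's loop, from an arbitrary run state, keeps the first (max_repeat-1-run_len) further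
-- members of the current run and then processes the remaining words group by group.
lemma pvALoop_eq (mr : Int) (ws : List String) : ∀ (out : List String) (r : Option String) (l : Int),
    pvALoop mr ws out r l =
      out ++ (ws.takeWhile (fun x => some (PySem.Str.lower x) == r)).take (mr - 1 - l).toNat
          ++ pvGroups (max 1 mr).toNat (ws.dropWhile (fun x => some (PySem.Str.lower x) == r)) := by
  induction ws with
  | nil => intro out r l; simp [pvALoop, pvGroups_nil]
  | cons w ws ih =>
    intro out r l
    by_cases h : (some (PySem.Str.lower w) == r) = true
    · rw [pvALoop]
      simp only [h, if_true, List.takeWhile_cons, List.dropWhile_cons]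
      by_cases hl : l + 1 ≥ mr
      · rw [if_pos hl, ih]
        have h0 : (mr - 1 - l).toNat = 0 := by omega
        have h1 : (mr - 1 - (l + 1)).toNat = 0 := by omega
        simp [h0, h1]
      · rw [if_neg hl, ih]
        have h1 : (mr - 1 - l).toNat = (mr - 1 - (l + 1)).toNat + 1 := by omega
        simp [h1, List.take_succ_cons]
    · rw [pvALoop]
      simp only [h, List.takeWhile_cons, List.dropWhile_cons, Bool.false_eq_true, if_false]
      rw [ih, pvGroups_cons]
      have hpred : (fun x => some (PySem.Str.lower x) == some (PySem.Str.lower w))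
          = (fun x => PySem.Str.lower x == PySem.Str.lower w) := by
        funext x; simp
      have hcap : (max 1 mr).toNat = (mr - 1 - 0).toNat + 1 := by omega
      rw [hpred, hcap, List.take_succ_cons]
      simp

lemma pvALoop_init (mr : Int) (ws : List String) :
    pvALoop mr ws [] none 0 = pvGroups (max 1 mr).toNat ws := by
  rw [pvALoop_eq]
  have h1 : (fun x => some (PySem.Str.lower x) == (none : Option String)) = (fun _ : String => false) := by
    funext x; rfl
  simp only [h1, pvTakeWhile_false, pvDropWhile_false, List.take_nil, List.nil_append]

-- shifting the start of enumerate
lemma pvEnumShift {α : Type} (xs : List α) : ∀ (s t : Int),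
    PySem.List.enumerate xs (s + t) = (PySem.List.enumerate xs s).map (fun p => (p.1 + t, p.2)) := by
  induction xs with
  | nil => intro s t; simp [PySem.List.enumerate_nil]
  | cons x xs ih =>
    intro s t
    rw [PySem.List.enumerate_cons, PySem.List.enumerate_cons, List.map_cons]
    have : s + t + 1 = (s + 1) + t := by ring
    rw [this, ih]

-- filtering enumerate by 'index < c' is take
lemma pvFilterLt (c : Int) : ∀ (G : List String) (s : Int),
    ((PySem.List.enumerate G s).filter (fun p => decide (p.1 < c))).map (·.2)
      = G.take (c - s).toNat := by
  intro G
  induction G with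
  | nil => intro s; simp [PySem.List.enumerate_nil]
  | cons g G ih =>
    intro s
    rw [PySem.List.enumerate_cons]
    by_cases hs : s < c
    · have h1 : (c - s).toNat = (c - (s + 1)).toNat + 1 := by omega
      simp [hs, ih, h1]
    · have h1 : (c - s).toNat = 0 := by omega
      have h2 : (c - (s + 1)).toNat = 0 := by omega
      simp [hs, ih, h1, h2]

-- inside a run of equal keys, the window check degenerates to 'index < cap'
lemma pvKeep_in_group (ws rest : List String) (cap : Int) (i : Int) (w : String)
    (hkeys : ∀ u ∈ ws, PySem.Str.lower u = PySem.Str.lower w)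
    (hilen : i < ws.length) :
    pvBKeep (ws ++ rest) cap i w = decide (i < cap) := by
  by_cases hc : i < cap
  · simp [pvBKeep, hc]
  · unfold pvBKeep
    simp only [decide_eq_false hc, Bool.false_or]
    rw [List.any_eq_false]
    intro j hj
    rw [PySem.List.mem_pyRange_one] at hj
    have hj0 : 0 ≤ j := by omega
    have hjlen : j.toNat < ws.length := by omega
    rw [PySem.List.pyGetD_of_nonneg _ _ hj0, List.getD_append _ _ _ _ hjlen,
      List.getD_eq_getElem _ _ hjlen, hkeys _ (List.getElem_mem hjlen)]
    simp

-- past the first group, the window check ignores the group: it equals the check on the rest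
lemma pvKeep_shift (G rest : List String) (cap : Int)
    (hG : G ≠ [])
    (hkeysG : ∀ u ∈ G, PySem.Str.lower u = PySem.Str.lower (G.headI))
    (hrest0 : ∀ h : rest ≠ [], PySem.Str.lower (rest.head h) ≠ PySem.Str.lower (G.headI))
    (i : Nat) (hilen : i < rest.length) :
    pvBKeep (G ++ rest) cap ((G.length : Int) + i) rest[i] = pvBKeep rest cap i rest[i] := by
  have hGlen : 1 ≤ G.length := List.length_pos_iff.mpr hG
  have hrne : rest ≠ [] := by intro h; subst h; simp at hilen
  by_cases hic : (i : Int) < cap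
  · -- right side is true; show left side true
    have hrhs : pvBKeep rest cap (i : Int) rest[i] = true := by simp [pvBKeep, hic]
    rw [hrhs]
    unfold pvBKeep
    rw [Bool.or_eq_true]
    by_cases hgl : (G.length : Int) + i < cap
    · exact Or.inl (by simpa using hgl)
    · right
      rw [List.any_eq_true]
      by_cases hdiff : ∃ j : Nat, j < i ∧ PySem.Str.lower rest[j]! ≠ PySem.Str.lower rest[i]
      · -- a differing word inside rest's own prefix is inside the window
        obtain ⟨j, hji, hjd⟩ := hdiff
        refine ⟨(G.length : Int) + j, ?_, ?_⟩
        · rw [PySem.List.mem_pyRange_one]; omega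
        · have hjlen : j < rest.length := by omega
          have h0 : (0:Int) ≤ (G.length : Int) + j := by omega
          rw [PySem.List.pyGetD_of_nonneg _ _ h0]
          have ht : ((G.length : Int) + j).toNat = G.length + j := by omega
          rw [ht, List.getD_append_right _ _ _ _ (by omega)]
          simp only [Nat.add_sub_cancel_left]
          rw [List.getD_eq_getElem _ _ hjlen]
          rw [getElem!_pos rest j hjlen] at hjd
          simpa using hjd
      · -- rest[0..i-1] all share rest[i]'s key, so rest[0] does: the last word of G differs
        push Not at hdiff
        refine ⟨(G.length : Int) - 1, ?_, ?_⟩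
        · rw [PySem.List.mem_pyRange_one]; omega
        · have h0 : (0:Int) ≤ (G.length : Int) - 1 := by omega
          rw [PySem.List.pyGetD_of_nonneg _ _ h0]
          have ht : ((G.length : Int) - 1).toNat = G.length - 1 := by omega
          have hlt : G.length - 1 < G.length := by omega
          rw [ht, List.getD_append _ _ _ _ hlt, List.getD_eq_getElem _ _ hlt]
          have hkey : PySem.Str.lower G[G.length - 1] = PySem.Str.lower (G.headI) :=
            hkeysG _ (List.getElem_mem hlt)
          have hr0 : PySem.Str.lower rest[0] = PySem.Str.lower rest[i] := by
            rcases Nat.eq_zero_or_pos i with h | h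
            · subst h; rfl
            · have := hdiff 0 h
              rw [getElem!_pos rest 0 (by omega)] at this
              exact this
          have hhead : rest.head hrne = rest[0] := by
            cases rest with | nil => exact absurd rfl hrne | cons a l => rfl
          have := hrest0 hrne
          rw [hhead, hr0] at this
          rw [hkey]
          simp only [Bool.not_eq_eq_eq_not, Bool.not_true, beq_eq_false_iff_ne, ne_eq]
          exact fun h => this h.symm
  · -- cap ≤ i: both windows live entirely inside rest and coincide
    have hic' : cap ≤ (i : Int) := by omega
    unfold pvBKeep
    have h1 : ¬ ((G.length : Int) + i < cap) := by omega
    rw [decide_eq_false h1, decide_eq_false hic, Bool.false_or, Bool.false_or]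
    rw [Bool.eq_iff_iff, List.any_eq_true, List.any_eq_true]
    constructor
    · rintro ⟨j, hj, hp⟩
      rw [PySem.List.mem_pyRange_one] at hj
      refine ⟨j - G.length, ?_, ?_⟩
      · rw [PySem.List.mem_pyRange_one]; omega
      · have hj0 : (0:Int) ≤ j - G.length := by omega
        rw [PySem.List.pyGetD_of_nonneg _ _ hj0]
        rw [PySem.List.pyGetD_of_nonneg _ _ (by omega : (0:Int) ≤ j)] at hp
        have ht : j.toNat = G.length + (j - G.length).toNat := by omega
        rw [ht, List.getD_append_right _ _ _ _ (by omega)] at hp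
        simpa using hp
    · rintro ⟨j, hj, hp⟩
      rw [PySem.List.mem_pyRange_one] at hj
      refine ⟨j + G.length, ?_, ?_⟩
      · rw [PySem.List.mem_pyRange_one]; omega
      · have hj0 : (0:Int) ≤ j + G.length := by omega
        rw [PySem.List.pyGetD_of_nonneg _ _ hj0]
        rw [PySem.List.pyGetD_of_nonneg _ _ (by omega : (0:Int) ≤ j)] at hp
        have ht : (j + (G.length:Int)).toNat = G.length + j.toNat := by omega
        rw [ht, List.getD_append_right _ _ _ _ (by omega)]
        simpa using hp

-- the comprehension computes the canonical group form
lemma pvBOut_eq (cap : Int) : ∀ (n : Nat) (ws : List String), ws.length ≤ n →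
    pvBOut ws cap = pvGroups cap.toNat ws := by
  intro n
  induction n with
  | zero =>
    intro ws hws
    rw [List.length_eq_zero_iff.mp (Nat.le_zero.mp hws)]
    simp [pvBOut, PySem.List.enumerate_nil, pvGroups_nil]
  | succ n ih =>
    intro ws hws
    cases ws with
    | nil => simp [pvBOut, PySem.List.enumerate_nil, pvGroups_nil]
    | cons w tl =>
      set key := PySem.Str.lower w with hkey
      set G : List String := w :: tl.takeWhile (fun x => PySem.Str.lower x == key) with hG
      set rest : List String := tl.dropWhile (fun x => PySem.Str.lower x == key) with hrest
      have hsplit : w :: tl = G ++ rest := by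
        rw [hG, hrest]; simp [List.takeWhile_append_dropWhile]
      have hkeysG : ∀ u ∈ G, PySem.Str.lower u = PySem.Str.lower (G.headI) := by
        intro u hu
        have hh : G.headI = w := by rw [hG]; rfl
        rw [hh]
        rcases List.mem_cons.mp hu with h | h
        · rw [h]
        · have := List.mem_takeWhile_imp h
          simpa [hkey] using this
      have hrest0 : ∀ h : rest ≠ [], PySem.Str.lower (rest.head h) ≠ PySem.Str.lower (G.headI) := by
        intro h
        have hh : G.headI = w := by rw [hG]; rfl
        rw [hh]
        have := List.head_dropWhile_not (fun x => PySem.Str.lower x == key) h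
        simpa [hkey] using this
      rw [hsplit, pvBOut, PySem.List.enumerate_append, List.filter_append, List.map_append]
      -- first group part
      have hpart1 : ((PySem.List.enumerate G 0).filter
            (fun p => pvBKeep (G ++ rest) cap p.1 p.2)).map (·.2) = G.take cap.toNat := by
        have hc : ∀ p ∈ PySem.List.enumerate G 0, pvBKeep (G ++ rest) cap p.1 p.2 = decide (p.1 < cap) := by
          intro p hp
          obtain ⟨k, hk, hpk⟩ := (PySem.List.mem_enumerate_iff _ _ _).mp hp
          rw [hpk]
          simp only [zero_add]
          exact pvKeep_in_group G rest cap k G[k]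
            (fun u hu => by rw [hkeysG u hu, hkeysG G[k] (List.getElem_mem hk)])
            (by exact_mod_cast hk)
        rw [List.filter_congr hc, pvFilterLt cap G 0]
        norm_num
      -- remainder
      have hpart2 : ((PySem.List.enumerate rest ((0:Int) + G.length)).filter
            (fun p => pvBKeep (G ++ rest) cap p.1 p.2)).map (·.2) = pvBOut rest cap := by
        rw [pvEnumShift rest 0 G.length, List.filter_map, List.map_map]
        rw [pvBOut]
        have hfil : ∀ p ∈ PySem.List.enumerate rest 0,
            ((fun p => pvBKeep (G ++ rest) cap p.1 p.2) ∘ (fun p => (p.1 + (G.length : Int), p.2))) p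
              = pvBKeep rest cap p.1 p.2 := by
          intro p hp
          obtain ⟨k, hk, hpk⟩ := (PySem.List.mem_enumerate_iff _ _ _).mp hp
          rw [hpk]
          simp only [Function.comp, zero_add]
          rw [add_comm (k : Int) (G.length : Int)]
          exact pvKeep_shift G rest cap (by rw [hG]; simp) hkeysG hrest0 k hk
        rw [List.filter_congr hfil]
        rfl
      rw [hpart1, hpart2]
      have hlen : rest.length ≤ n := by
        have h1 : rest.length ≤ tl.length := by rw [hrest]; exact tl.length_dropWhile_le _
        have h2 : tl.length + 1 ≤ n + 1 := by simpa using hws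
        omega
      rw [ih rest hlen, ← hsplit, pvGroups_cons, ← hkey, ← hG, ← hrest]

-- ===== VERDICT (by name: the statement is the Claim_ definition above) =====
theorem dedupe_repeated_words_py_spec : Claim_equal_dedupe_repeated_words_py := by
  intro text max_repeat _
  unfold Spec_dedupe_repeated_words_py dedupe_repeated_words_py dedupe_repeated_words_py_alt
  simp only [pvALoop_init, pvBOut_eq (max 1 max_repeat)
    (PySem.Str.split₀ text).length (PySem.Str.split₀ text) le_rfl]
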